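-- pv_equiv track=rewrite | github.com/kenanboracic4/AoC | Day 6/z12.py | podijeli_u_blokove
-- ===== SOURCE A (Python) =====
-- def podijeli_u_blokove(linije):
--     # Izjednačava dužinu svih linija razmacima
--     max_duzina = max(len(l) for l in linije)
--     linije = [l.ljust(max_duzina) for l in linije]
--
--     redovi = len(linije)
--     kolone = max_duzina
--
--     # Traži kolone koje su potpuno prazne (samo razmaci)
--     razdvajac = [all(linije[r][c] == " " for r in range(redovi)) for c in range(kolone)]
--
--     blokovi = []
--     c = 0
--     while c < kolone:
--         if razdvajac[c]:
--             c += 1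
--             continue
--
--         pocetak = c
--         while c < kolone and not razdvajac[c]:
--             c += 1
--         kraj = c - 1
--
--         blokovi.append((pocetak, kraj))
--
--     return linije, blokovi
-- ===== SOURCE B (Python) =====
-- def podijeli_u_blokove(linije):
--     # Izjednačava dužinu svih linija razmacima
--     max_duzina = max(len(l) for l in linije)
--     linije = [l.ljust(max_duzina) for l in linije]
--     kolone = max_duzina
--
--     # separator-gap formulation: list the blank-column indices with sentinels
--     # -1 and kolone; every gap wider than 1 between consecutive separators is a block
--     seps = [-1] + [c for c in range(kolone) if all(l[c] == " " for l in linije)] + [kolone]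
--     blokovi = [(a + 1, b - 1) for a, b in zip(seps, seps[1:]) if b - a > 1]
--
--     return linije, blokovi
-- ===== Notes on version B (the rewrite author's own statement) =====
-- stated objective: alternative
-- what changed: A's nested while-loops that scan column runs are replaced by a separator-gap formulation: collect the blank-column indices with -1/kolone sentinels and emit a block for every consecutive-separator gap wider than one.
-- outside the precondition, e.g. on podijeli_u_blokove([]): A raises ValueError, B raises ValueError
import Mathlib
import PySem

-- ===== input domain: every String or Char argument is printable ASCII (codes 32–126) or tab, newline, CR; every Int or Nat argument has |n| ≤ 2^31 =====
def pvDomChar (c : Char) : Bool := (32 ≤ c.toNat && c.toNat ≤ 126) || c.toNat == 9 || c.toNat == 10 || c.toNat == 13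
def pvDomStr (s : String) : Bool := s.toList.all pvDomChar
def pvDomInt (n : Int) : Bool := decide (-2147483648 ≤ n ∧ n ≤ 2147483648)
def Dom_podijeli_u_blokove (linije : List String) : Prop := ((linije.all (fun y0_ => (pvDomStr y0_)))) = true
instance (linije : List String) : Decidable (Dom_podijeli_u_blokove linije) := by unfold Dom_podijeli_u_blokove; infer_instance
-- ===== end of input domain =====

-- B replaces A's index-based while-loop run scanner with a separator-gap formulation
-- (blank-column indices plus -1/kolone sentinels; each gap wider than 1 is a block); same value, different decomposition.

-- ===== PORT A =====

-- l.ljust(w): pad with spaces on the right up to width w (exact for any ASCII string)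
def pyLjust (l : String) (w : Nat) : String :=
  String.ofList (l.toList ++ List.replicate (w - l.toList.length) ' ')

-- inner while: 'while c < kolone and not razdvajac[c]: c += 1'
-- (razdvajac[c] with c < kolone = length razdvajac, so getD is exact)
def innerA (rz : List Bool) (kolone c : Nat) : Nat :=
  if c < kolone ∧ rz.getD c true = false then innerA rz kolone (c + 1) else c
termination_by kolone - c
decreasing_by omega

theorem innerA_ge (rz : List Bool) (kolone c : Nat) : c ≤ innerA rz kolone c := by
  fun_induction innerA rz kolone c with
  | case1 c h ih => omega
  | case2 c h => omega

theorem innerA_gt (rz : List Bool) (k c : Nat) (h1 : c < k) (h2 : rz.getD c true = false) :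
    c < innerA rz k c := by
  rw [innerA]
  simp only [h1, h2, and_self, if_true]
  have := innerA_ge rz k (c + 1); omega

-- outer while loop of A, state = index c, emitting (pocetak, kraj) blocks
def outerA (rz : List Bool) (kolone c : Nat) : List (Int × Int) :=
  if h : c < kolone then
    if hb : rz.getD c true then outerA rz kolone (c + 1)
    else
      ((c : Int), ((innerA rz kolone c : Nat) : Int) - 1) :: outerA rz kolone (innerA rz kolone c)
  else []
termination_by kolone - c
decreasing_by
  · omega
  · have h1 : c < innerA rz kolone c := innerA_gt rz kolone c h (by simpa using hb)
    omega

def podijeli_u_blokove (linije : List String) : List String × (List (Int × Int)) :=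
  -- max(len(l) for l in linije): ValueError on [] → none, excluded by Pre_
  match PySem.List.max? (linije.map (fun l => PySem.Str.len l)) (fun x => x) with
  | none => ([], [])
  | some m =>
    let max_duzina : Nat := m.toNat   -- lengths are nonnegative, so toNat is exact
    let linije2 := linije.map (fun l => pyLjust l max_duzina)
    let redovi := linije2.length
    let kolone := max_duzina
    -- razdvajac[c] = all(linije[r][c] == " " for r in range(redovi)); both indices are in range
    let razdvajac : List Bool := (List.range kolone).map (fun c =>
      (List.range redovi).all (fun r => ((linije2.getD r "").toList.getD c ' ') == ' '))
    (linije2, outerA razdvajac kolone 0)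

-- ===== PORT B =====

def podijeli_u_blokove_alt (linije : List String) : List String × (List (Int × Int)) :=
  match PySem.List.max? (linije.map (fun l => PySem.Str.len l)) (fun x => x) with
  | none => ([], [])
  | some m =>
    let max_duzina : Nat := m.toNat
    let linije2 := linije.map (fun l => pyLjust l max_duzina)
    let kolone := max_duzina
    -- seps = [-1] + [c for c in range(kolone) if all(l[c] == " " for l in linije)] + [kolone]
    let seps : List Int :=
      -1 :: ((List.range kolone).filterMap (fun c =>
        if linije2.all (fun l => l.toList.getD c ' ' == ' ') then some ((c : Nat) : Int) else none))
        ++ [(kolone : Int)]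
    -- [(a+1, b-1) for a, b in zip(seps, seps[1:]) if b - a > 1]
    let blokovi := (seps.zip (seps.drop 1)).filterMap (fun ab =>
      if ab.2 - ab.1 > 1 then some (ab.1 + 1, ab.2 - 1) else none)
    (linije2, blokovi)

-- ===== PRECONDITION & SPEC =====
-- Pre_ excludes only the empty list, on which A's max() raises ValueError.
def Pre_podijeli_u_blokove (linije : List String) : Prop := linije ≠ []
instance (linije : List String) : Decidable (Pre_podijeli_u_blokove linije) := by
  unfold Pre_podijeli_u_blokove; infer_instance

def pvWitness_podijeli_u_blokove : List String := ["ab c", "a  c"]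

def Spec_podijeli_u_blokove (linije : List String) (out : List String × (List (Int × Int))) : Prop :=
  out = podijeli_u_blokove_alt linije
instance (linije : List String) (out : List String × (List (Int × Int))) : Decidable (Spec_podijeli_u_blokove linije out) := by unfold Spec_podijeli_u_blokove; infer_instance

-- ===== CLAIM (what is proved, stated in full; the proofs are below) =====
def Claim_equal_podijeli_u_blokove : Prop := ∀ (linije : List String), Dom_podijeli_u_blokove linije → Pre_podijeli_u_blokove linije → Spec_podijeli_u_blokove linije (podijeli_u_blokove linije)

-- ===== LEMMAS AND PROOFS =====

-- separators of the columns c..k-1 under blank-predicate bl, with the kolone sentinel appended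
def sepsFrom (bl : Nat → Bool) (c k : Nat) : List Int :=
  if c < k then (if bl c then ((c : Nat) : Int) :: sepsFrom bl (c + 1) k else sepsFrom bl (c + 1) k)
  else [((k : Nat) : Int)]
termination_by k - c
decreasing_by all_goals omega

-- consecutive-pair scan, recursion-friendly form of B's zip/filterMap comprehension
def pairsOf : List Int → List (Int × Int)
  | a :: b :: t => (if b - a > 1 then [(a + 1, b - 1)] else []) ++ pairsOf (b :: t)
  | _ => []

theorem zip_pairsOf (l : List Int) :
    (l.zip (l.drop 1)).filterMap (fun ab => if ab.2 - ab.1 > 1 then some (ab.1 + 1, ab.2 - 1) else none)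
      = pairsOf l := by
  induction l with
  | nil => rfl
  | cons a t ih =>
    cases t with
    | nil => rfl
    | cons b t' =>
      rw [pairsOf]
      simp only [List.drop_succ_cons, List.drop_zero, List.zip_cons_cons, List.filterMap_cons] at *
      rw [ih]
      split <;> simp_all

theorem sepsFrom_congr (bl bl' : Nat → Bool) (c k : Nat)
    (h : ∀ i, c ≤ i → i < k → bl i = bl' i) : sepsFrom bl c k = sepsFrom bl' c k := by
  fun_induction sepsFrom bl c k with
  | case1 c hck hbl ih =>
    have hbl' : bl' c = true := (h c le_rfl hck) ▸ hbl
    conv_rhs => rw [sepsFrom]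
    simp [hck, hbl', ih (fun i hi hik => h i (by omega) hik)]
  | case2 c hck hbl ih =>
    have hbl' : ¬ bl' c = true := (h c le_rfl hck) ▸ hbl
    conv_rhs => rw [sepsFrom]
    simp [hck, hbl', ih (fun i hi hik => h i (by omega) hik)]
  | case3 c hck =>
    conv_rhs => rw [sepsFrom]
    simp [hck]

theorem filter_eq_sepsFrom (bl : Nat → Bool) (k : Nat) :
    ((List.range k).filterMap (fun c => if bl c then some ((c : Nat) : Int) else none)) ++ [((k : Nat) : Int)]
      = sepsFrom bl 0 k := by
  suffices h : ∀ n c, c + n = k →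
      ((List.range' c n).filterMap (fun c => if bl c then some ((c : Nat) : Int) else none)) ++ [((k : Nat) : Int)]
        = sepsFrom bl c k by
    rw [List.range_eq_range']; exact h k 0 (by omega)
  intro n
  induction n with
  | zero => intro c hc; rw [sepsFrom]; simp [show ¬ c < k by omega]
  | succ n ih =>
    intro c hc
    rw [List.range'_succ, sepsFrom]
    simp only [List.filterMap_cons, show c < k by omega, if_true]
    by_cases hb : bl c <;> simp [hb, ih (c + 1) (by omega)]

theorem innerA_sepsFrom (rz : List Bool) (k c : Nat) :
    sepsFrom (fun i => rz.getD i true) c k = sepsFrom (fun i => rz.getD i true) (innerA rz k c) k := by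
  fun_induction innerA rz k c with
  | case1 c h ih =>
    rw [← ih, sepsFrom]
    have h2 := h.2
    simp only [List.getD] at h2
    simp [h.1, h2]
  | case2 c h => rfl

theorem innerA_stop (rz : List Bool) (k c : Nat) (hck : c ≤ k) :
    innerA rz k c = k ∨ (innerA rz k c < k ∧ rz.getD (innerA rz k c) true = true) := by
  revert hck
  fun_induction innerA rz k c with
  | case1 c h ih => intro _; exact ih (by omega)
  | case2 c h =>
    intro hck
    by_cases hc : c < k
    · right
      refine ⟨hc, ?_⟩
      by_cases hb : rz.getD c true = true
      · exact hb
      · exact absurd ⟨hc, by simpa using hb⟩ h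
    · left; omega

theorem innerA_le (rz : List Bool) (k c : Nat) (h : c ≤ k) : innerA rz k c ≤ k := by
  rcases innerA_stop rz k c h with h1 | h1 <;> omega

-- A's while loop equals pairsOf of the separator list headed by the running sentinel c-1
theorem outerA_eq_pairsOf (rz : List Bool) (k : Nat) (c : Nat) (hck : c ≤ k) :
    outerA rz k c = pairsOf (((c : Int) - 1) :: sepsFrom (fun i => rz.getD i true) c k) := by
  fun_induction outerA rz k c with
  | case1 c h hrz ih =>
    rw [sepsFrom]
    simp only [h, if_true, hrz, if_true]
    rw [ih (by omega), pairsOf]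
    have hno : ¬ ((c : Int) - ((c : Int) - 1) > 1) := by omega
    simp
  | case2 c h hrz ih =>
    have hrz' : rz.getD c true = false := by simpa using hrz
    have hgt := innerA_gt rz k c h hrz'
    have hle := innerA_le rz k c (by omega)
    rw [innerA_sepsFrom rz k c]
    have ihv := ih (by omega)
    rcases innerA_stop rz k c (by omega) with hstop | ⟨hlt, htrue⟩
    · rw [hstop, sepsFrom]
      simp only [show ¬ k < k by omega, if_false]
      rw [pairsOf]
      have hgap : (((k : Nat) : Int) - ((c : Int) - 1) > 1) := by
        have : c < k := by omega
        omega
      simp only [hgap, if_true]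
      have hnil : outerA rz k k = [] := by
        rw [outerA]; simp
      rw [hnil]
      have hone : pairsOf [((k : Nat) : Int)] = [] := rfl
      rw [hone]
      simp only [List.append_nil, List.cons.injEq, Prod.mk.injEq, and_true]
      omega
    · conv_rhs => rw [sepsFrom]
      simp only [hlt, if_true, htrue, if_true]
      rw [pairsOf]
      have hgap : (((innerA rz k c : Nat) : Int) - ((c : Int) - 1) > 1) := by omega
      simp only [hgap, if_true]
      rw [sepsFrom] at ihv
      simp only [hlt, if_true, htrue, if_true] at ihv
      rw [pairsOf] at ihv
      have hno : ¬ (((innerA rz k c : Nat) : Int) - (((innerA rz k c : Nat) : Int) - 1) > 1) := by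
        omega
      simp only [hno, if_false, List.nil_append] at ihv
      rw [ihv]
      simp
  | case3 c h =>
    rw [sepsFrom]
    simp only [show ¬ c < k by omega, if_false]
    rw [pairsOf]
    have hno : ¬ (((k : Nat) : Int) - ((c : Int) - 1) > 1) := by
      have : c = k := by omega
      omega
    simp only [hno, if_false, List.nil_append]
    rfl

-- all over range(len g) of g.getD = all over g directly
theorem all_range_getD (g : List String) (p : String → Bool) :
    (List.range g.length).all (fun r => p (g.getD r "")) = g.all p := by
  rw [Bool.eq_iff_iff]
  simp only [List.all_eq_true, List.mem_range]
  constructor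
  · intro h x hx
    obtain ⟨i, hi, rfl⟩ := List.getElem_of_mem hx
    have := h i hi
    rwa [List.getD_eq_getElem g "" hi] at this
  · intro h i hi
    rw [List.getD_eq_getElem g "" hi]
    exact h _ (List.getElem_mem hi)

-- ===== VERDICT (by name: the statement is the Claim_ definition above) =====
theorem podijeli_u_blokove_spec : Claim_equal_podijeli_u_blokove := by
  intro linije _hdom _hpre
  unfold Spec_podijeli_u_blokove podijeli_u_blokove podijeli_u_blokove_alt
  cases hmax : PySem.List.max? (linije.map (fun l => PySem.Str.len l)) (fun x => x) with
  | none => rfl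
  | some m =>
    simp only []
    refine Prod.ext rfl ?_
    set k := m.toNat
    set linije2 := linije.map (fun l => pyLjust l k) with hlin
    set rz : List Bool := (List.range k).map (fun c =>
      (List.range linije2.length).all (fun r => ((linije2.getD r "").toList.getD c ' ') == ' ')) with hrz
    have hbl : ∀ c, c < k → rz.getD c true = linije2.all (fun l => l.toList.getD c ' ' == ' ') := by
      intro c hc
      rw [hrz, PySem.List.getD_map_range _ _ _ _ hc]
      exact all_range_getD linije2 (fun l => l.toList.getD c ' ' == ' ')
    rw [outerA_eq_pairsOf rz k 0 (by omega), zip_pairsOf]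
    congr 1
    have hseps : ((List.range k).filterMap (fun c =>
          if linije2.all (fun l => l.toList.getD c ' ' == ' ') then some ((c : Nat) : Int) else none))
          ++ [((k : Nat) : Int)]
        = sepsFrom (fun i => rz.getD i true) 0 k := by
      rw [filter_eq_sepsFrom]
      exact sepsFrom_congr _ _ 0 k (fun i _ hik => (hbl i hik).symm)
    simp only [List.cons_append]
    rw [hseps]
    norm_num
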